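-- pv_equiv track=rewrite | github.com/yaeba/binary-search-solutions | solutions/Anagram-Partitioning.py | solve
-- ===== SOURCE A (Python) =====
-- from collections import defaultdict
--
-- def solve(a, b):
--     diffs = defaultdict(int)
--     res = [0]
--     for i, (x, y) in enumerate(zip(a, b)):
--         diffs[x] += 1
--         diffs[y] -= 1
--         if not any(diffs.values()):
--             res.append(i + 1)
--
--     return res[:-1] if res[-1] == len(a) else []
-- ===== SOURCE B (Python) =====
-- def solve(a, b):
--     # Maintain a running count of nonzero char-diff entries instead of
--     # rescanning all dict values at every position.
--     cnt = {}
--     nonzero = 0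
--     cuts = [0]
--     i = 0
--     for x, y in zip(a, b):
--         for c, d in ((x, 1), (y, -1)):
--             old = cnt.get(c, 0)
--             new = old + d
--             cnt[c] = new
--             nonzero += (1 if new != 0 else 0) - (1 if old != 0 else 0)
--         i += 1
--         if nonzero == 0:
--             cuts.append(i)
--     return cuts[:-1] if cuts[-1] == len(a) else []
-- ===== Notes on version B (the rewrite author's own statement) =====
-- stated objective: alternative
-- what changed: Instead of rescanning every dict value with any(diffs.values()) at each position, B maintains a running count of keys whose diff is nonzero and tests it in O(1) per position.
import Mathlib
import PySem

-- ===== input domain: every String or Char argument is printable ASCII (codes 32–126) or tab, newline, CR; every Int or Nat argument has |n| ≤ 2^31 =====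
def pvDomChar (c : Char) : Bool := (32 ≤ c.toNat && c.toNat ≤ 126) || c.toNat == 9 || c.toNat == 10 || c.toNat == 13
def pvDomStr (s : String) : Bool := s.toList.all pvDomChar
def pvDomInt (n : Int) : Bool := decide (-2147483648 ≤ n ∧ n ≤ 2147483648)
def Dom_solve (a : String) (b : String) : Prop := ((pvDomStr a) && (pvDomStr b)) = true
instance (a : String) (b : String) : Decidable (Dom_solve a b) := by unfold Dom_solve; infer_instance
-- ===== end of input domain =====

-- B replaces A's per-position rescan of all dict values by a running count of nonzero diff entries (objective: alternative).

-- ===== PORT A =====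
-- one loop step of A: diffs[x] += 1; diffs[y] -= 1; if not any(diffs.values()): res.append(i+1)
def solveStepA (st : PySem.Dict Char Int × List Int) (p : Int × (Char × Char)) :
    PySem.Dict Char Int × List Int :=
  let diffs := (st.1.modify p.2.1 0 (· + 1)).modify p.2.2 0 (· + (-1))
  let res := if !(diffs.values.any (fun v => v != 0)) then st.2 ++ [p.1 + 1] else st.2
  (diffs, res)

def solve (a : String) (b : String) : List Int :=
  let st := (PySem.List.enumerate (a.toList.zip b.toList) 0).foldl solveStepA
    (PySem.Dict.empty, [0])
  let res := st.2
  if PySem.List.pyGetD res (-1) 0 = PySem.Str.len a then PySem.List.slice res none (some (-1)) else []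

-- ===== PORT B =====
-- the inner 'for c, d in ((x, 1), (y, -1))' body of B
def solveUpdB (cn : PySem.Dict Char Int × Int) (c : Char) (d : Int) :
    PySem.Dict Char Int × Int :=
  let old := cn.1.getD c 0
  let new := old + d
  (cn.1.insert c new,
   cn.2 + ((if new ≠ 0 then (1 : Int) else 0) - (if old ≠ 0 then (1 : Int) else 0)))

-- one loop step of B; state = (cnt, nonzero, cuts, i)
def solveStepB (st : PySem.Dict Char Int × Int × List Int × Int) (p : Char × Char) :
    PySem.Dict Char Int × Int × List Int × Int :=
  let cn := solveUpdB (solveUpdB (st.1, st.2.1) p.1 1) p.2 (-1)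
  let i' := st.2.2.2 + 1
  let cuts := if cn.2 = 0 then st.2.2.1 ++ [i'] else st.2.2.1
  (cn.1, cn.2, cuts, i')

def solve_alt (a : String) (b : String) : List Int :=
  let st := (a.toList.zip b.toList).foldl solveStepB (PySem.Dict.empty, 0, [0], 0)
  let cuts := st.2.2.1
  if PySem.List.pyGetD cuts (-1) 0 = PySem.Str.len a then PySem.List.slice cuts none (some (-1)) else []

-- ===== PRECONDITION & SPEC =====
def Spec_solve (a : String) (b : String) (out : List Int) : Prop := out = solve_alt a b
instance (a : String) (b : String) (out : List Int) : Decidable (Spec_solve a b out) := by unfold Spec_solve; infer_instance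

-- ===== CLAIM (what is proved, stated in full; the proofs are below) =====
def Claim_equal_solve : Prop := ∀ (a : String) (b : String), Dom_solve a b → Spec_solve a b (solve a b)

-- ===== LEMMAS AND PROOFS =====

-- number of nonzero values in a dict
def cntNZ (d : PySem.Dict Char Int) : Nat := d.values.countP (fun v => v != 0)

lemma countP_map_update (k : Char) (w : Int) (g : Char → Int) (p : Int → Bool)
    (l : List Char) (hnd : l.Nodup) (hk : k ∈ l) :
    ((l.map (fun j => if j = k then w else g j)).countP p : Int)
      = (l.map g).countP p + (if p w then 1 else 0) - (if p (g k) then 1 else 0) := by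
  induction l with
  | nil => cases hk
  | cons a l ih =>
    rcases List.nodup_cons.mp hnd with ⟨ha, hl⟩
    rcases List.mem_cons.mp hk with rfl | hk'
    · have : (l.map (fun j => if j = k then w else g j)) = l.map g := by
        apply List.map_congr_left
        intro j hj
        have : j ≠ k := fun h => ha (h ▸ hj)
        simp [this]
      simp only [List.map_cons, List.countP_cons, this]
      push_cast
      by_cases hw : p w <;> by_cases hg : p (g k) <;> simp [hw, hg]
    · have hak : a ≠ k := fun h => ha (h ▸ hk')
      simp only [List.map_cons, List.countP_cons, if_neg hak]
      push_cast
      rw [ih hl hk']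
      ring

lemma cntNZ_insert (d : PySem.Dict Char Int) (k : Char) (w : Int) (hnd : d.keys.Nodup) :
    (cntNZ (d.insert k w) : Int)
      = cntNZ d + (if w ≠ 0 then 1 else 0) - (if d.getD k 0 ≠ 0 then 1 else 0) := by
  by_cases hc : d.contains k = true
  · have hkeys := PySem.Dict.keys_insert_of_contains d w hc
    have hmem : k ∈ d.keys := (PySem.Dict.contains_iff_mem_keys d k).mp hc
    unfold cntNZ
    rw [PySem.Dict.values_eq_map_keys (d.insert k w) (hkeys ▸ hnd) 0,
        PySem.Dict.values_eq_map_keys d hnd 0, hkeys]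
    have hrw : (d.keys.map (fun j => (d.insert k w).getD j 0))
        = d.keys.map (fun j => if j = k then w else d.getD j 0) := by
      apply List.map_congr_left
      intro j _
      rw [PySem.Dict.getD_insert]
    rw [hrw]
    have := countP_map_update k w (fun j => d.getD j 0) (fun v => v != 0) d.keys hnd hmem
    simpa using this
  · have hc' : d.contains k = false := by simpa using hc
    have hv : (d.insert k w).values = d.values ++ [w] := by
      simp only [PySem.Dict.values, PySem.Dict.items_insert_of_not_contains d w hc',
        List.map_append, List.map_cons, List.map_nil]
    have hg0 : d.getD k 0 = 0 := PySem.Dict.getD_of_not_contains d 0 hc'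
    unfold cntNZ
    rw [hv, List.countP_append, hg0]
    simp only [List.countP_cons, List.countP_nil]
    push_cast
    by_cases hw : w = 0 <;> simp [hw]

-- 'not any(values)' in A is the same test as 'nonzero count = 0' in B
lemma any_eq_cntNZ (d : PySem.Dict Char Int) :
    (!(d.values.any (fun v => v != 0))) = ((cntNZ d : Int) == 0) := by
  unfold cntNZ
  rcases h : d.values.any (fun v => v != 0) with _ | _
  · have : d.values.countP (fun v => v != 0) = 0 :=
      List.countP_eq_zero.mpr (by simpa using List.any_eq_false.mp h)
    simp [this]
  · rcases List.any_eq_true.mp h with ⟨v, hv, hvp⟩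
    have : 0 < d.values.countP (fun v => v != 0) := List.countP_pos_iff.mpr ⟨v, hv, hvp⟩
    simp only [Bool.not_true]
    symm
    simpa using (by omega : ¬ ((d.values.countP (fun v => v != 0) : Int) = 0))

-- loop invariant: A's fold state is B's (dict, cuts), and B's counter tracks cntNZ
lemma loop_inv (zs : List (Char × Char)) :
    ∀ (d : PySem.Dict Char Int) (res : List Int) (i : Int), d.keys.Nodup →
    (PySem.List.enumerate zs i).foldl solveStepA (d, res)
      = ((zs.foldl solveStepB (d, (cntNZ d : Int), res, i)).1,
         (zs.foldl solveStepB (d, (cntNZ d : Int), res, i)).2.2.1) := by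
  induction zs with
  | nil => intro d res i _; simp [PySem.List.enumerate]
  | cons xy zs ih =>
    intro d res i hnd
    obtain ⟨x, y⟩ := xy
    rw [PySem.List.enumerate_cons]
    have hmod : (d.modify x 0 (· + 1)).modify y 0 (· + (-1))
        = (d.insert x (d.getD x 0 + 1)).insert y
            ((d.insert x (d.getD x 0 + 1)).getD y 0 + (-1)) := rfl
    set d1 := d.insert x (d.getD x 0 + 1) with hd1
    set d2 := d1.insert y (d1.getD y 0 + (-1)) with hd2
    have hnd1 : d1.keys.Nodup := PySem.Dict.nodup_keys_insert d x _ hnd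
    have hnd2 : d2.keys.Nodup := PySem.Dict.nodup_keys_insert d1 y _ hnd1
    have hnz1 : (cntNZ d1 : Int) = cntNZ d
        + ((if d.getD x 0 + 1 ≠ 0 then (1 : Int) else 0) - (if d.getD x 0 ≠ 0 then (1 : Int) else 0)) := by
      rw [cntNZ_insert d x _ hnd]; ring
    have hnz2 : (cntNZ d2 : Int) = cntNZ d1
        + ((if d1.getD y 0 + (-1) ≠ 0 then (1 : Int) else 0) - (if d1.getD y 0 ≠ 0 then (1 : Int) else 0)) := by
      rw [cntNZ_insert d1 y _ hnd1]; ring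
    have hstepB : solveStepB (d, (cntNZ d : Int), res, i) (x, y)
        = (d2, (cntNZ d2 : Int),
           if (cntNZ d2 : Int) = 0 then res ++ [i + 1] else res, i + 1) := by
      simp only [solveStepB, solveUpdB, ← hd1, ← hnz1, ← hd2, ← hnz2]
    have hstepA : solveStepA (d, res) (i, (x, y))
        = (d2, if (cntNZ d2 : Int) = 0 then res ++ [i + 1] else res) := by
      simp only [solveStepA, hmod, any_eq_cntNZ]
      rcases h : ((cntNZ d2 : Int) == 0) with _ | _ <;>
        simp_all
    rw [List.foldl_cons, List.foldl_cons, hstepA, hstepB, ih _ _ _ hnd2]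

-- ===== VERDICT (by name: the statement is the Claim_ definition above) =====
theorem solve_spec : Claim_equal_solve := by
  intro a b _
  unfold Spec_solve solve solve_alt
  have h0 : (cntNZ PySem.Dict.empty : Int) = 0 := by simp [cntNZ, PySem.Dict.empty]
  have := loop_inv (a.toList.zip b.toList) PySem.Dict.empty [0] 0
    (by simp [PySem.Dict.keys, PySem.Dict.empty])
  rw [h0] at this
  simp only [this]
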